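-- pv_equiv track=rewrite | github.com/getsentry/taskbroker | flatten_use_imports.py | strip_use_comments
-- ===== SOURCE A (Python) =====
-- def strip_use_comments(s: str) -> str:
--     out = []
--     i = 0
--     n = len(s)
--     while i < n:
--         if s[i : i + 2] == "//":
--             while i < n and s[i] != "\n":
--                 i += 1
--             continue
--         if s[i : i + 2] == "/*":
--             j = s.find("*/", i + 2)
--             i = j + 2 if j >= 0 else n
--             continue
--         out.append(s[i])
--         i += 1
--     return "".join(out)
-- ===== SOURCE B (Python) =====
-- def strip_use_comments(s: str) -> str:
--     # Bulk-slice scanner: jump between comment markers with str.find and copy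
--     # whole chunks, instead of A's char-by-char loop.
--     chunks = []
--     rest = s
--     while True:
--         p1 = rest.find("//")
--         p2 = rest.find("/*")
--         if p1 < 0 and p2 < 0:
--             chunks.append(rest)
--             break
--         if p1 >= 0 and (p2 < 0 or p1 < p2):
--             chunks.append(rest[:p1])
--             nl = rest.find("\n", p1)
--             rest = rest[nl:] if nl >= 0 else ""
--         else:
--             chunks.append(rest[:p2])
--             e = rest.find("*/", p2 + 2)
--             rest = rest[e + 2:] if e >= 0 else ""
--     return "".join(chunks)
-- ===== Notes on version B (the rewrite author's own statement) =====
-- stated objective: faster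
-- what changed: Replaces A's per-character index loop (re-slicing s[i:i+2] at every position) with a bulk scanner that jumps directly between comment markers via str.find and copies whole slices into a chunk list.
import Mathlib
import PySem

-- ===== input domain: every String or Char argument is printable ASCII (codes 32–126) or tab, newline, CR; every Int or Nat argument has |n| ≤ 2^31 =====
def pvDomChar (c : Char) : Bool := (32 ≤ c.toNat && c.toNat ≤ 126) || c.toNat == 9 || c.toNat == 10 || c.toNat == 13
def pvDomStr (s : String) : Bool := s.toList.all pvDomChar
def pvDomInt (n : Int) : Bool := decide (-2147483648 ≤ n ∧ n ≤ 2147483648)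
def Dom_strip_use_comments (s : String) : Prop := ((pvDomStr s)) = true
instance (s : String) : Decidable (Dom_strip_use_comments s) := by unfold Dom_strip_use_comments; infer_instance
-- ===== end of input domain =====

-- B replaces A's per-character index loop with a bulk scanner that jumps between
-- comment markers via find and copies whole slices.

-- ===== PORT A =====
-- helper facts the ports cite in their decreasing_by blocks
theorem slice2 (s : List Char) (i : Nat) :
    PySem.List.slice s (some (i : Int)) (some ((i : Int) + 2)) = (s.drop i).take 2 := by
  have h : ((i : Int) + 2) = ((i + 2 : Nat) : Int) := by push_cast; ring
  rw [h, PySem.List.slice_natCast]; congr 1; omega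

theorem marker_facts {s : List Char} {i : Nat} {a b : Char} (h : (s.drop i).take 2 = [a, b]) :
    i + 2 ≤ s.length ∧ a :: b :: s.drop (i + 2) = s.drop i := by
  have hl : ((s.drop i).take 2).length = 2 := by rw [h]; rfl
  simp [List.length_take, List.length_drop] at hl
  have hdd : (s.drop i).drop 2 = s.drop (i + 2) := by
    rw [List.drop_drop, Nat.add_comm]
  have hta := List.take_append_drop 2 (s.drop i)
  rw [h, hdd] at hta
  exact ⟨by omega, hta⟩

theorem find_facts (s sub : List Char) :
    PySem.Chars.find s sub = -1 ∨
      ∃ m : Nat, PySem.Chars.find s sub = (m : Int) ∧ sub <+: s.drop m ∧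
        ∀ j, j < m → ¬ sub <+: s.drop j := by
  by_cases hne : PySem.Chars.find s sub = -1
  · exact Or.inl hne
  · right
    have hnn : 0 ≤ PySem.Chars.find s sub := by
      have := PySem.Chars.neg_one_le_find s sub
      omega
    obtain ⟨h1, h2⟩ := PySem.Chars.find_spec hnn
    exact ⟨(PySem.Chars.find s sub).toNat, by omega, h1, h2⟩

theorem findFrom_facts (s sub : List Char) (k : Nat) (hk : k ≤ s.length) :
    PySem.Chars.findFrom s sub (k : Int) none = -1 ∨
      ∃ m : Nat, PySem.Chars.findFrom s sub (k : Int) none = (m : Int) ∧ k ≤ m ∧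
        sub <+: s.drop m ∧ ∀ j, k ≤ j → j < m → ¬ sub <+: s.drop j := by
  by_cases hne : PySem.Chars.findFrom s sub (k : Int) none = -1
  · exact Or.inl hne
  · right
    obtain ⟨h1, h2, h3⟩ := PySem.Chars.findFrom_natCast_spec s sub k hk hne
    exact ⟨(PySem.Chars.findFrom s sub (k : Int) none).toNat, by omega, by omega, h2, h3⟩

theorem prefix_drop_length {s sub : List Char} {m : Nat} (h : sub <+: s.drop m)
    (hs : 0 < sub.length) : m + sub.length ≤ s.length := by
  have := h.length_le
  simp [List.length_drop] at this
  omega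

-- inner `while i < n and s[i] != "\n": i += 1`
def skipA (s : List Char) (i : Nat) : Nat :=
  if h : i < s.length then
    if s[i] = '\n' then i else skipA s (i + 1)
  else i
termination_by s.length - i

theorem skipA_ge (s : List Char) (i : Nat) : i ≤ skipA s i := by
  unfold skipA
  split
  · split
    · exact le_refl _
    · exact le_trans (Nat.le_succ i) (skipA_ge s (i + 1))
  · exact le_refl _
termination_by s.length - i

theorem skipA_gt (s : List Char) (i : Nat) (h : i < s.length) (hne : s[i] ≠ '\n') :
    i < skipA s i := by
  unfold skipA
  rw [dif_pos h, if_neg hne]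
  exact lt_of_lt_of_le (Nat.lt_succ_self i) (skipA_ge s (i + 1))

-- outer while loop of A; state (i, out)
def stripALoop (s : List Char) (i : Nat) (out : List Char) : List Char :=
  if h : i < s.length then
    if h2 : PySem.List.slice s (some (i : Int)) (some ((i : Int) + 2)) = ['/', '/'] then
      stripALoop s (skipA s i) out
    else if h3 : PySem.List.slice s (some (i : Int)) (some ((i : Int) + 2)) = ['/', '*'] then
      let j := PySem.Chars.findFrom s ['*', '/'] ((i : Int) + 2) none
      stripALoop s (if 0 ≤ j then j.toNat + 2 else s.length) out
    else
      stripALoop s (i + 1) (out ++ [s[i]])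
  else out
termination_by s.length - i
decreasing_by
  · rw [slice2] at h2
    obtain ⟨hlen, hdrop⟩ := marker_facts h2
    have hgi : s[i] = '/' := by
      have h0 : s.drop i = '/' :: '/' :: s.drop (i + 2) := hdrop.symm
      have hx : (s.drop i)[0]? = s[i + 0]? := List.getElem?_drop
      rw [h0] at hx
      simp at hx
      simpa [List.getElem?_eq_getElem h, eq_comm] using hx
    have := skipA_gt s i h (by rw [hgi]; decide)
    omega
  · rw [slice2] at h3
    obtain ⟨hlen, _⟩ := marker_facts h3
    have hcast : ((i : Int) + 2) = ((i + 2 : Nat) : Int) := by push_cast; ring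
    split
    · rename_i hpos
      rw [hcast] at hpos ⊢
      rcases findFrom_facts s ['*', '/'] (i + 2) hlen with hcase | ⟨m, heq, hge, _, _⟩
      · omega
      · rw [heq]
        omega
    · omega
  · omega

-- ===== PORT B =====
def stripBLoop (rest : List Char) (chunks : List (List Char)) : List (List Char) :=
  let p1 := PySem.Chars.find rest ['/', '/']
  let p2 := PySem.Chars.find rest ['/', '*']
  if h1 : p1 < 0 ∧ p2 < 0 then
    chunks ++ [rest]
  else if h2 : 0 ≤ p1 ∧ (p2 < 0 ∨ p1 < p2) then
    let nl := PySem.Chars.findFrom rest ['\n'] p1 none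
    stripBLoop (if 0 ≤ nl then PySem.List.slice rest (some nl) none else [])
      (chunks ++ [PySem.List.slice rest none (some p1)])
  else
    let e := PySem.Chars.findFrom rest ['*', '/'] (p2 + 2) none
    stripBLoop (if 0 ≤ e then PySem.List.slice rest (some (e + 2)) none else [])
      (chunks ++ [PySem.List.slice rest none (some p2)])
termination_by rest.length
decreasing_by
  · have hp1 : 0 ≤ PySem.Chars.find rest ['/', '/'] := h2.1
    rcases find_facts rest ['/', '/'] with hcase | ⟨m1, heq1, hpre1, hmin1⟩
    · rw [hcase] at hp1; omega
    · have hlen1 : m1 + 2 ≤ rest.length := prefix_drop_length hpre1 (by decide)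
      split
      · rename_i hnl
        rw [heq1] at hnl ⊢
        rcases findFrom_facts rest ['\n'] m1 (by omega) with hcase2 | ⟨m, heq2, hge, hpre, _⟩
        · rw [hcase2] at hnl; omega
        · rw [heq2] at hnl ⊢
          have hmne : m ≠ m1 := by
            intro hcontra
            rw [hcontra] at hpre
            have htk : (rest.drop m1).take 2 = ['/', '/'] :=
              (List.prefix_iff_eq_take.mp hpre1).symm
            obtain ⟨_, hd1⟩ := marker_facts htk
            rcases hpre with ⟨t, ht⟩
            rw [← hd1] at ht
            simp at ht
          rw [PySem.List.slice_from_natCast]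
          simp [List.length_drop]
          omega
      · simp
        omega
  · have hp2 : 0 ≤ PySem.Chars.find rest ['/', '*'] := by
      have ha := PySem.Chars.neg_one_le_find rest ['/', '/']
      have hb := PySem.Chars.neg_one_le_find rest ['/', '*']
      by_contra hcon
      rw [not_le] at hcon
      exact h2 ⟨by omega, Or.inl (by omega)⟩
    rcases find_facts rest ['/', '*'] with hcase | ⟨m2, heq2, hpre2, _⟩
    · rw [hcase] at hp2; omega
    · have hlen2 : m2 + 2 ≤ rest.length := prefix_drop_length hpre2 (by decide)
      split
      · rename_i he
        rw [heq2] at he ⊢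
        have hcast : ((m2 : Int) + 2) = ((m2 + 2 : Nat) : Int) := by push_cast; ring
        rw [hcast] at he ⊢
        rcases findFrom_facts rest ['*', '/'] (m2 + 2) (by omega) with hcase3 | ⟨m, heq3, hge3, _, _⟩
        · rw [hcase3] at he; omega
        · rw [heq3]
          have hcast2 : ((m : Int) + 2) = ((m + 2 : Nat) : Int) := by push_cast; ring
          rw [hcast2, PySem.List.slice_from_natCast]
          simp [List.length_drop]
          omega
      · simp
        omega

def strip_use_comments (s : String) : String :=
  String.ofList (stripALoop s.toList 0 [])

def strip_use_comments_alt (s : String) : String :=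
  String.ofList (PySem.Chars.join [] (stripBLoop s.toList []))

-- ===== PRECONDITION & SPEC =====
def Spec_strip_use_comments (s : String) (out : String) : Prop := out = strip_use_comments_alt s
instance (s : String) (out : String) : Decidable (Spec_strip_use_comments s out) := by unfold Spec_strip_use_comments; infer_instance

-- ===== CLAIM (what is proved, stated in full; the proofs are below) =====
def Claim_equal_strip_use_comments : Prop := ∀ (s : String), Dom_strip_use_comments s → Spec_strip_use_comments s (strip_use_comments s)

-- ===== LEMMAS AND PROOFS =====
theorem stripALoop_end (s : List Char) (i : Nat) (out : List Char) (h : ¬ i < s.length) :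
    stripALoop s i out = out := by
  rw [stripALoop, dif_neg h]

theorem drop_drop' (s : List Char) (i j : Nat) : (s.drop i).drop j = s.drop (i + j) := by
  rw [List.drop_drop]

theorem char_prefix_iff (s : List Char) (m : Nat) (c : Char) :
    [c] <+: s.drop m ↔ s[m]? = some c := by
  constructor
  · rintro ⟨t, ht⟩
    have hx : (s.drop m)[0]? = s[m + 0]? := List.getElem?_drop
    rw [← ht] at hx
    simpa using hx.symm
  · intro h
    have hm : m < s.length := by
      by_contra hc
      rw [List.getElem?_eq_none (by omega)] at h
      simp at h
    have hg : s[m] = c := by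
      rw [List.getElem?_eq_getElem hm] at h
      simpa using h
    exact ⟨s.drop (m + 1), by rw [List.drop_eq_getElem_cons hm, hg]; rfl⟩

theorem no_marker {r sub : List Char} (h : PySem.Chars.find r sub = -1) (m : Nat) :
    ¬ sub <+: r.drop m := by
  intro hp
  exact ((PySem.Chars.find_eq_neg_one_iff _ _).mp h) (hp.isInfix.trans (List.drop_suffix m r).isInfix)

theorem take2_of_prefix {s : List Char} {m : Nat} {a b : Char} (h : [a, b] <+: s.drop m) :
    (s.drop m).take 2 = [a, b] :=
  (List.prefix_iff_eq_take.mp h).symm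

theorem skipA_spec (s : List Char) (i : Nat) (hi : i ≤ s.length) :
    skipA s i ≤ s.length ∧ (skipA s i = s.length ∨ s[skipA s i]? = some '\n') ∧
      ∀ k, i ≤ k → k < skipA s i → s[k]? ≠ some '\n' := by
  rw [skipA]
  split
  · rename_i h
    split
    · rename_i hnl
      refine ⟨hi, Or.inr ?_, ?_⟩
      · rw [List.getElem?_eq_getElem h, hnl]
      · intro k hk1 hk2; omega
    · rename_i hnl
      obtain ⟨a1, a2, a3⟩ := skipA_spec s (i + 1) (by omega)
      refine ⟨a1, a2, ?_⟩
      intro k hk1 hk2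
      by_cases hk : k = i
      · subst hk
        rw [List.getElem?_eq_getElem h]
        simpa using hnl
      · exact a3 k (by omega) hk2
  · rename_i h
    exact ⟨by omega, Or.inl (by omega), by intro k hk1 hk2; omega⟩
termination_by s.length - i

theorem skipA_eq (s : List Char) (i : Nat) (hi : i ≤ s.length) :
    skipA s i = if PySem.Chars.find (s.drop i) ['\n'] = -1 then s.length
      else i + (PySem.Chars.find (s.drop i) ['\n']).toNat := by
  obtain ⟨a1, a2, a3⟩ := skipA_spec s i hi
  rcases find_facts (s.drop i) ['\n'] with hf | ⟨m, heq, hpre, hmin⟩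
  · rw [if_pos hf]
    rcases a2 with h | h
    · exact h
    · exfalso
      have hz := no_marker hf (skipA s i - i)
      rw [drop_drop'] at hz
      have hx : i + (skipA s i - i) = skipA s i := by have := skipA_ge s i; omega
      rw [hx] at hz
      exact hz ((char_prefix_iff s (skipA s i) '\n').mpr h)
  · rw [if_neg (by rw [heq]; omega), heq, Int.toNat_natCast]
    rw [drop_drop'] at hpre
    have hnl : s[i + m]? = some '\n' := (char_prefix_iff s (i + m) '\n').mp hpre
    have hlt : i + m < s.length := by
      by_contra hc
      rw [List.getElem?_eq_none (by omega)] at hnl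
      simp at hnl
    have hle : skipA s i ≤ i + m := by
      by_contra hc
      exact a3 (i + m) (by omega) (by omega) hnl
    have hge : i + m ≤ skipA s i := by
      by_contra hc
      rcases a2 with h | h
      · omega
      · have hz := hmin (skipA s i - i) (by have := skipA_ge s i; omega)
        rw [drop_drop'] at hz
        have hx : i + (skipA s i - i) = skipA s i := by have := skipA_ge s i; omega
        rw [hx] at hz
        exact hz ((char_prefix_iff s (skipA s i) '\n').mpr h)
    omega

theorem copyTo (s : List Char) (p : Nat) (hp : p ≤ s.length) :
    ∀ i out, i ≤ p →
      (∀ j, i ≤ j → j < p → ¬ (['/', '/'] <+: s.drop j) ∧ ¬ (['/', '*'] <+: s.drop j)) →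
      stripALoop s i out = stripALoop s p (out ++ (s.drop i).take (p - i)) := by
  intro i out hip hfree
  by_cases hlt : i < p
  · have hi : i < s.length := by omega
    rw [stripALoop, dif_pos hi, slice2]
    have hnf1 : (s.drop i).take 2 ≠ ['/', '/'] := by
      intro hc
      exact (hfree i le_rfl hlt).1 (hc ▸ List.take_prefix 2 (s.drop i))
    have hnf2 : (s.drop i).take 2 ≠ ['/', '*'] := by
      intro hc
      exact (hfree i le_rfl hlt).2 (hc ▸ List.take_prefix 2 (s.drop i))
    rw [dif_neg hnf1, dif_neg hnf2]
    rw [copyTo s p hp (i + 1) (out ++ [s[i]]) (by omega)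
      (fun j hj1 hj2 => hfree j (by omega) hj2)]
    congr 1
    rw [List.append_assoc]
    congr 1
    have hsplit : s.drop i = s[i] :: s.drop (i + 1) := List.drop_eq_getElem_cons hi
    rw [hsplit]
    have hpi : p - i = (p - i - 1) + 1 := by omega
    rw [hpi, List.take_succ_cons]
    simp only [List.singleton_append]
    have hx : p - (i + 1) = p - i - 1 := by omega
    rw [hx]
  · have : i = p := by omega
    subst this
    simp
termination_by i out => p - i

theorem stripBLoop_acc (rest : List Char) (chunks : List (List Char)) :
    stripBLoop rest chunks = chunks ++ stripBLoop rest [] := by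
  refine stripBLoop.induct (motive := fun r _ =>
    ∀ cs, stripBLoop r cs = cs ++ stripBLoop r []) ?_ ?_ ?_ rest [] chunks
  · intro rest c0 p1 p2 h1 cs
    conv_lhs => rw [stripBLoop]
    conv_rhs => rw [stripBLoop]
    rw [dif_pos h1]
    rw [dif_pos h1]
    simp
  · intro rest c0 p1 p2 h1 h2 nl ih cs
    conv_lhs => rw [stripBLoop]
    conv_rhs => rw [stripBLoop]
    rw [dif_neg h1]
    rw [dif_neg h1]
    rw [dif_pos h2]
    rw [dif_pos h2]
    simp only [nl, p1, dite_eq_ite] at ih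
    conv_lhs => rw [ih]
    conv_rhs => rw [ih]
    simp
  · intro rest c0 p1 p2 h1 h2 e ih cs
    conv_lhs => rw [stripBLoop]
    conv_rhs => rw [stripBLoop]
    rw [dif_neg h1]
    rw [dif_neg h1]
    rw [dif_neg h2]
    rw [dif_neg h2]
    simp only [e, p2, dite_eq_ite] at ih
    conv_lhs => rw [ih]
    conv_rhs => rw [ih]
    simp

theorem join_cons (a : List Char) (l : List (List Char)) :
    PySem.Chars.join [] (a :: l) = a ++ PySem.Chars.join [] l := by
  cases l with
  | nil => simp [PySem.Chars.join, List.intercalate]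
  | cons b t => simp [PySem.Chars.join, List.intercalate]

theorem stripBLoop_nil : stripBLoop [] [] = [[]] := by
  rw [stripBLoop]
  rw [dif_pos ?_]
  · rfl
  · constructor <;>
    · rw [(PySem.Chars.find_eq_neg_one_iff _ _).mpr (by simp)]
      omega

theorem shift_free {s : List Char} {i j : Nat} {sub : List Char} (hij : i ≤ j)
    (h : ¬ sub <+: (s.drop i).drop (j - i)) : ¬ sub <+: s.drop j := by
  rw [drop_drop'] at h
  rwa [show i + (j - i) = j by omega] at h

theorem lineStep (s : List Char) (i : Nat) (out : List Char) (m1 : Nat)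
    (heq1 : PySem.Chars.find (s.drop i) ['/', '/'] = (m1 : Int))
    (hpre1 : ['/', '/'] <+: (s.drop i).drop m1)
    (hq2 : PySem.Chars.find (s.drop i) ['/', '*'] < 0 ∨
      (m1 : Int) < PySem.Chars.find (s.drop i) ['/', '*'])
    (hfree : ∀ j, j < m1 →
      ¬ ['/', '/'] <+: (s.drop i).drop j ∧ ¬ ['/', '*'] <+: (s.drop i).drop j)
    (IH : ∀ i' out', i' ≤ s.length → s.length - i' < s.length - i →
      stripALoop s i' out' = out' ++ PySem.Chars.join [] (stripBLoop (s.drop i') [])) :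
    stripALoop s i out = out ++ PySem.Chars.join [] (stripBLoop (s.drop i) []) := by
  have hpre1' : ['/', '/'] <+: s.drop (i + m1) := by
    rw [drop_drop'] at hpre1; exact hpre1
  have htk := take2_of_prefix hpre1'
  obtain ⟨hlen, hdcons⟩ := marker_facts htk
  have hcopy := copyTo s (i + m1) (by omega) i out (by omega) (fun j hj1 hj2 =>
    ⟨shift_free hj1 ((hfree (j - i) (by omega)).1),
     shift_free hj1 ((hfree (j - i) (by omega)).2)⟩)
  rw [hcopy, show i + m1 - i = m1 by omega]
  rw [stripALoop, dif_pos (show i + m1 < s.length by omega), slice2, dif_pos htk]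
  have hslash : s[i + m1] = '/' := by
    have hx : (s.drop (i + m1))[0]? = s[i + m1 + 0]? := List.getElem?_drop
    rw [← hdcons] at hx
    simp at hx
    simpa [List.getElem?_eq_getElem (show i + m1 < s.length by omega), eq_comm] using hx
  have hsle := (skipA_spec s (i + m1) (by omega)).1
  have hsgt := skipA_gt s (i + m1) (by omega) (by rw [hslash]; decide)
  rw [IH (skipA s (i + m1)) (out ++ (s.drop i).take m1) hsle (by omega)]
  conv_rhs => rw [stripBLoop]
  rw [heq1]
  rw [dif_neg (by rintro ⟨hz, -⟩; omega)]
  rw [dif_pos ⟨by omega, hq2⟩]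
  rw [PySem.List.slice_to_natCast]
  rw [PySem.Chars.findFrom_natCast (s.drop i) ['\n'] m1 (by rw [List.length_drop]; omega)]
  rw [drop_drop']
  rw [skipA_eq s (i + m1) (by omega)]
  by_cases hg : PySem.Chars.find (s.drop (i + m1)) ['\n'] = -1
  · rw [if_pos hg, if_pos hg]
    simp only []
    rw [if_neg (show ¬ (0 : Int) ≤ -1 by norm_num)]
    rw [List.drop_length, stripBLoop_nil]
    conv_rhs => rw [stripBLoop_acc]
    rw [stripBLoop_nil]
    simp [PySem.Chars.join, List.intercalate]
  · rcases find_facts (s.drop (i + m1)) ['\n'] with hff | ⟨g, heqg, hpreg, -⟩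
    · exact absurd hff hg
    · rw [if_neg hg, if_neg hg, heqg]
      simp only []
      rw [if_pos (by omega)]
      rw [show ((m1 : Int) + (g : Int)) = ((m1 + g : Nat) : Int) by push_cast; ring]
      rw [PySem.List.slice_from_natCast, drop_drop', Int.toNat_natCast]
      rw [show i + (m1 + g) = i + m1 + g by omega]
      conv_rhs => rw [stripBLoop_acc]
      simp only [List.nil_append, List.singleton_append]
      rw [join_cons]
      simp [List.append_assoc]

theorem blockStep (s : List Char) (i : Nat) (out : List Char) (m2 : Nat)
    (heq2 : PySem.Chars.find (s.drop i) ['/', '*'] = (m2 : Int))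
    (hpre2 : ['/', '*'] <+: (s.drop i).drop m2)
    (hq1 : PySem.Chars.find (s.drop i) ['/', '/'] = -1 ∨
      (m2 : Int) < PySem.Chars.find (s.drop i) ['/', '/'])
    (hfree : ∀ j, j < m2 →
      ¬ ['/', '/'] <+: (s.drop i).drop j ∧ ¬ ['/', '*'] <+: (s.drop i).drop j)
    (IH : ∀ i' out', i' ≤ s.length → s.length - i' < s.length - i →
      stripALoop s i' out' = out' ++ PySem.Chars.join [] (stripBLoop (s.drop i') [])) :
    stripALoop s i out = out ++ PySem.Chars.join [] (stripBLoop (s.drop i) []) := by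
  have hpre2' : ['/', '*'] <+: s.drop (i + m2) := by
    rw [drop_drop'] at hpre2; exact hpre2
  have htk := take2_of_prefix hpre2'
  obtain ⟨hlen, hdcons⟩ := marker_facts htk
  have hcopy := copyTo s (i + m2) (by omega) i out (by omega) (fun j hj1 hj2 =>
    ⟨shift_free hj1 ((hfree (j - i) (by omega)).1),
     shift_free hj1 ((hfree (j - i) (by omega)).2)⟩)
  rw [hcopy, show i + m2 - i = m2 by omega]
  rw [stripALoop, dif_pos (show i + m2 < s.length by omega), slice2]
  rw [dif_neg (by rw [htk]; simp)]
  rw [dif_pos htk]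
  rw [show ((i + m2 : Nat) : Int) + 2 = ((i + m2 + 2 : Nat) : Int) by push_cast; ring]
  rw [PySem.Chars.findFrom_natCast s ['*', '/'] (i + m2 + 2) (by omega)]
  conv_rhs => rw [stripBLoop]
  rw [heq2]
  rw [dif_neg (by rintro ⟨-, hz⟩; omega)]
  rw [dif_neg (by
    rintro ⟨ha, hb⟩
    rcases hq1 with hz | hz <;> rcases hb with hw | hw <;> omega)]
  rw [PySem.List.slice_to_natCast]
  rw [show ((m2 : Int) + 2) = ((m2 + 2 : Nat) : Int) by push_cast; ring]
  rw [PySem.Chars.findFrom_natCast (s.drop i) ['*', '/'] (m2 + 2)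
    (by rw [List.length_drop]; omega)]
  rw [drop_drop', show i + (m2 + 2) = i + m2 + 2 by omega]
  by_cases hf : PySem.Chars.find (s.drop (i + m2 + 2)) ['*', '/'] = -1
  · rw [if_pos hf, if_pos hf]
    simp only []
    rw [if_neg (show ¬ (0 : Int) ≤ -1 by norm_num),
        if_neg (show ¬ (0 : Int) ≤ -1 by norm_num)]
    rw [stripALoop_end s s.length _ (by omega)]
    conv_rhs => rw [stripBLoop_acc]
    rw [stripBLoop_nil]
    simp [PySem.Chars.join, List.intercalate]
  · rcases find_facts (s.drop (i + m2 + 2)) ['*', '/'] with hff | ⟨g, heqg, hpreg, -⟩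
    · exact absurd hff hf
    · rw [if_neg hf, if_neg hf, heqg]
      simp only []
      rw [if_pos (by omega), if_pos (by omega)]
      rw [show ((i + m2 + 2 : Nat) : Int) + (g : Int) = ((i + m2 + 2 + g : Nat) : Int)
        by push_cast; ring]
      rw [Int.toNat_natCast]
      rw [show ((m2 + 2 : Nat) : Int) + (g : Int) + 2 = ((m2 + 2 + g + 2 : Nat) : Int)
        by push_cast; ring]
      rw [PySem.List.slice_from_natCast, drop_drop']
      rw [show i + (m2 + 2 + g + 2) = i + m2 + 2 + g + 2 by omega]
      have hpreg' : ['*', '/'] <+: s.drop (i + m2 + 2 + g) := by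
        rw [drop_drop'] at hpreg; exact hpreg
      have hgle := prefix_drop_length hpreg' (by decide)
      rw [IH (i + m2 + 2 + g + 2) (out ++ (s.drop i).take m2) (by simpa using hgle)
        (by omega)]
      conv_rhs => rw [stripBLoop_acc]
      simp only [List.nil_append, List.singleton_append]
      rw [join_cons]
      simp [List.append_assoc]

theorem mainEq (s : List Char) (i : Nat) (out : List Char) (hi : i ≤ s.length) :
    stripALoop s i out = out ++ PySem.Chars.join [] (stripBLoop (s.drop i) []) := by
  have IH : ∀ i' out', i' ≤ s.length → s.length - i' < s.length - i →
      stripALoop s i' out' = out' ++ PySem.Chars.join [] (stripBLoop (s.drop i') []) :=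
    fun i' out' hi' _ => mainEq s i' out' hi'
  rcases find_facts (s.drop i) ['/', '/'] with hf1 | ⟨m1, heq1, hpre1, hmin1⟩ <;>
    rcases find_facts (s.drop i) ['/', '*'] with hf2 | ⟨m2, heq2, hpre2, hmin2⟩
  · -- no markers anywhere
    rw [copyTo s s.length le_rfl i out hi (fun j hj1 hj2 =>
      ⟨shift_free hj1 (no_marker hf1 (j - i)), shift_free hj1 (no_marker hf2 (j - i))⟩)]
    rw [stripALoop_end s s.length _ (by omega)]
    conv_rhs => rw [stripBLoop]
    rw [dif_pos ⟨by rw [hf1]; norm_num, by rw [hf2]; norm_num⟩]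
    rw [List.take_of_length_le (by rw [List.length_drop])]
    simp [PySem.Chars.join, List.intercalate]
  · exact blockStep s i out m2 heq2 hpre2 (Or.inl hf1)
      (fun j hj => ⟨no_marker hf1 j, hmin2 j hj⟩) IH
  · exact lineStep s i out m1 heq1 hpre1 (Or.inl (by rw [hf2]; norm_num))
      (fun j hj => ⟨hmin1 j hj, no_marker hf2 j⟩) IH
  · have hne : m1 ≠ m2 := by
      intro h
      subst h
      have h1 := take2_of_prefix hpre1
      have h2 := take2_of_prefix hpre2
      rw [h1] at h2
      simp at h2
    rcases Nat.lt_or_ge m1 m2 with hlt | hge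
    · exact lineStep s i out m1 heq1 hpre1 (Or.inr (by rw [heq2]; omega))
        (fun j hj => ⟨hmin1 j hj, hmin2 j (by omega)⟩) IH
    · have hlt2 : m2 < m1 := by omega
      exact blockStep s i out m2 heq2 hpre2 (Or.inr (by rw [heq1]; omega))
        (fun j hj => ⟨hmin1 j (by omega), hmin2 j hj⟩) IH
termination_by s.length - i
decreasing_by omega

-- ===== VERDICT (by name: the statement is the Claim_ definition above) =====
theorem strip_use_comments_spec : Claim_equal_strip_use_comments := by
  unfold Claim_equal_strip_use_comments
  intro s _
  unfold Spec_strip_use_comments strip_use_comments strip_use_comments_alt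
  rw [mainEq s.toList 0 [] (by omega)]
  simp
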